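-- pv_equiv track=rewrite | github.com/StrADAl0/Class | lesson 1/c.py | func
-- ===== SOURCE A (Python) =====
-- def func(n):
--     ans = {}
--     n = str(n)
--     for i in n:
--         if(i not in ans.keys()):
--             ans[i] = 0
--         ans[i] += 1
--     return ans
-- ===== SOURCE B (Python) =====
-- def func(n):
--     s = str(n)
--     return {c: s.count(c) for c in dict.fromkeys(s)}
-- ===== Notes on version B (the rewrite author's own statement) =====
-- stated objective: idiomatic
-- what changed: B replaces A's single accumulating pass with a dict comprehension over the first-occurrence-ordered distinct characters, counting each with s.count(c).
import Mathlib
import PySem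

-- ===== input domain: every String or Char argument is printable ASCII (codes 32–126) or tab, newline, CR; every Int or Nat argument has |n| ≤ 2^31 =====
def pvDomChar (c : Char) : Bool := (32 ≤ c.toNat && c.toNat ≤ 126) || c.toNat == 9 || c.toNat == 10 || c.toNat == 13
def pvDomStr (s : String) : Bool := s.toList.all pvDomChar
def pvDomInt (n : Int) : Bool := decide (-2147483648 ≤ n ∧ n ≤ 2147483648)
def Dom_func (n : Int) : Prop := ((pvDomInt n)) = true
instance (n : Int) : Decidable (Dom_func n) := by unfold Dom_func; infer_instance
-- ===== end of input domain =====

-- B is the idiomatic dict comprehension over the distinct characters (first-occurrence order),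
-- counting each with s.count(c), instead of A's single accumulating pass.

-- ===== PORT A =====
-- iterating the Python string str(n) yields its characters as length-1 strings
def func (n : Int) : List (String × Int) :=
  ((PySem.Int.toStr n).toList.map (fun c => String.mk [c])).foldl
    (fun ans i =>
      let ans := if ans.contains i = false then ans.insert i 0 else ans
      ans.insert i (ans.getD i 0 + 1))
    PySem.Dict.empty |>.items

-- ===== PORT B =====
-- dict.fromkeys(s) = first-occurrence dedup; s.count(c) for a length-1 c = count of that character
def func_alt (n : Int) : List (String × Int) :=
  let ks := (PySem.Int.toStr n).toList.map (fun c => String.mk [c])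
  (PySem.List.dedup ks).map (fun c => (c, (ks.count c : Int)))

-- ===== PRECONDITION & SPEC =====
def Spec_func (n : Int) (out : List (String × Int)) : Prop := out = func_alt n
instance (n : Int) (out : List (String × Int)) : Decidable (Spec_func n out) := by unfold Spec_func; infer_instance

-- ===== CLAIM (what is proved, stated in full; the proofs are below) =====
def Claim_equal_func : Prop := ∀ (n : Int), Dom_func n → Spec_func n (func n)

-- ===== LEMMAS AND PROOFS =====

-- A's loop body (setdefault-then-increment) is the plain counting step
theorem func_stepA_eq (d : PySem.Dict String Int) (i : String) :
    (let d' := if d.contains i = false then d.insert i 0 else d;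
     d'.insert i (d'.getD i 0 + 1)) = d.insert i (d.getD i 0 + 1) := by
  by_cases h : d.contains i = false
  · simp only [h, if_true]
    rw [PySem.Dict.getD_insert_self, PySem.Dict.insert_insert_self,
        PySem.Dict.getD_of_not_contains (h := h)]
  · simp [h]

-- ===== VERDICT (by name: the statement is the Claim_ definition above) =====
theorem func_spec : Claim_equal_func := by
  intro n _
  unfold Spec_func func func_alt
  have hstep : (fun (ans : PySem.Dict String Int) (i : String) =>
      let ans := if ans.contains i = false then ans.insert i 0 else ans
      ans.insert i (ans.getD i 0 + 1))
      = fun d i => d.insert i (d.getD i 0 + 1) := by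
    funext d i; exact func_stepA_eq d i
  rw [hstep, PySem.Dict.foldl_insert_getD_add_one_eq_counter, PySem.Dict.items_counter]
  simp [PySem.List.dedup_eq_ofList]
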